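-- pv_equiv track=rewrite | github.com/fqf2009/LeetCode | 2188_MinimumTimeToFinishRace.py | minimumFinishTime
-- ===== SOURCE A (Python) =====
-- from typing import List
-- from functools import cache
--
-- def minimumFinishTime(tires: List[List[int]], changeTime: int, numLaps: int) -> int:
--     @cache
--     def dp(i: int) -> int:
--         if i == 1: return go_straight[1]
--         res = go_straight[i] if i <= 18 else 10**10
--         for j in range(1, min(19, i//2 + 1)):
--             res = min(res, dp(j) + changeTime + dp(i - j))
--         return res
--
--     go_straight = [10**10] * 19
--     for f, r in tires:
--         totalTime = lapTime = f
--         for i in range(1, 19):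
--             go_straight[i] = min(go_straight[i], totalTime)
--             lapTime *= r
--             totalTime += lapTime
--             if totalTime > 2e5: break
--
--     return dp(numLaps)
-- ===== SOURCE B (Python) =====
-- def minimumFinishTime(tires, changeTime, numLaps):
--     # same single-tire precomputation as A
--     best = [10**10] * 19
--     for f, r in tires:
--         total = lap = f
--         for i in range(1, 19):
--             best[i] = min(best[i], total)
--             lap *= r
--             total += lap
--             if total > 2e5:
--                 break
--     # bottom-up table instead of A's @cache recursion
--     dp = [10**10] * (numLaps + 1)
--     for i in range(1, numLaps + 1):
--         dp[i] = best[i] if i <= 18 else 10**10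
--         for j in range(1, min(19, i // 2 + 1)):
--             dp[i] = min(dp[i], dp[j] + changeTime + dp[i - j])
--     return dp[numLaps]
-- ===== Notes on version B (the rewrite author's own statement) =====
-- stated objective: alternative
-- what changed: Replaces the @cache top-down recursion dp(i) with an explicit bottom-up table filled in increasing lap order (same go_straight precomputation, same recurrence).
-- outside the precondition, e.g. on minimumFinishTime([[1, 2]], 5, -1): A returns 10000000000, B raises IndexError
import Mathlib
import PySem

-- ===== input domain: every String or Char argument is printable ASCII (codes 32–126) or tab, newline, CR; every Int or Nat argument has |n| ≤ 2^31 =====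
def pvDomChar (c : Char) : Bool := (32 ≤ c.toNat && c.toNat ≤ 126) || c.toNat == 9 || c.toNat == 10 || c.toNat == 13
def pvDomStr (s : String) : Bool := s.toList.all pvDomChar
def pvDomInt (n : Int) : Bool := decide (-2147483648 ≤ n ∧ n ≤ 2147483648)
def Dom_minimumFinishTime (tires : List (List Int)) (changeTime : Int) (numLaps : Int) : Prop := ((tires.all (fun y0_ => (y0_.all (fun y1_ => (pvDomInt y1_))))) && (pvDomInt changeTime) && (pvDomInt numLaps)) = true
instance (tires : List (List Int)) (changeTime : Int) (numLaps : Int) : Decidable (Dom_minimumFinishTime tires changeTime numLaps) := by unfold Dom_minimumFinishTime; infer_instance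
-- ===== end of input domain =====

-- ===== PORT A =====
-- B replaces A's @cache top-down recursion by an explicit bottom-up DP table; same
-- go_straight precomputation (identical in both Pythons, shared here as buildGS).

-- inner 'for i in range(1, 19): ... if totalTime > 2e5: break' loop (2e5 = 200000 exactly)
def innerLoop (gs : List Int) (total lap r : Int) (i : Nat) : List Int :=
  if i < 19 then
    if total + lap * r > 200000 then gs.set i (min (gs.getD i 0) total)
    else innerLoop (gs.set i (min (gs.getD i 0) total)) (total + lap * r) (lap * r) r (i + 1)
  else gs
termination_by 19 - i

-- go_straight = [10**10]*19; for f, r in tires: ...  (rows not of length 2 raise in Python; outside Pre_)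
def buildGS (tires : List (List Int)) : List Int :=
  tires.foldl
    (fun gs t =>
      match t with
      | [f, r] => innerLoop gs f f r 1
      | _ => gs)
    (List.replicate 19 ((10:Int) ^ 10))

-- A's @cache-d recursive dp(i): the cache is threaded explicitly as a lookup
-- function Nat -> Option Int (lookup before computing, store after), exactly as
-- functools.cache does; the recursion and branch order follow A's dp literally.
def dpA (gs : List Int) (ct : Int) (i : Nat) (memo : Nat → Option Int) :
    Int × (Nat → Option Int) :=
  match memo i with
  | some v => (v, memo)
  | none =>
    if i = 1 then
      (gs.getD 1 0, fun k => if k = i then some (gs.getD 1 0) else memo k)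
    else
      let p := (List.range' 1 (min 18 (i / 2))).attach.foldl
        (fun acc j =>
          let p1 := dpA gs ct j.1 acc.2
          let p2 := dpA gs ct (i - j.1) p1.2
          (min acc.1 (p1.1 + ct + p2.1), p2.2))
        (if i ≤ 18 then gs.getD i 0 else (10:Int) ^ 10, memo)
      (p.1, fun k => if k = i then some p.1 else p.2 k)
termination_by i
decreasing_by
  all_goals
    have := List.mem_range'_1.mp j.2
    omega

def minimumFinishTime (tires : List (List Int)) (changeTime : Int) (numLaps : Int) : Int :=
  (dpA (buildGS tires) changeTime numLaps.toNat (fun _ => none)).1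

-- ===== PORT B =====
-- one iteration of 'for i in range(1, numLaps+1)': Python writes dp[i] once, in
-- increasing order of i, so the in-place write is the append of the finished cell
def stepB (best : List Int) (ct : Int) (dp : List Int) (i : Nat) : List Int :=
  dp ++ [(List.range' 1 (min 18 (i / 2))).foldl
          (fun res j => min res (dp.getD j 0 + ct + dp.getD (i - j) 0))
          (if i ≤ 18 then best.getD i 0 else (10:Int) ^ 10)]

def tableB (best : List Int) (ct : Int) (n : Nat) : List Int :=
  (List.range' 1 n).foldl (stepB best ct) [(10:Int) ^ 10]

def minimumFinishTime_alt (tires : List (List Int)) (changeTime : Int) (numLaps : Int) : Int :=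
  (tableB (buildGS tires) changeTime numLaps.toNat).getD numLaps.toNat 0

-- ===== PRECONDITION & SPEC =====
-- Pre_ excludes inputs where Python A raises (a tire row not of length 2: ValueError;
-- numLaps < -19: IndexError) and negative numLaps in [-19,-1], where A returns a
-- negative-index wraparound value while B's table indexing raises IndexError.
def Pre_minimumFinishTime (tires : List (List Int)) (changeTime : Int) (numLaps : Int) : Prop :=
  (∀ t ∈ tires, t.length = 2) ∧ 0 ≤ numLaps
instance (tires : List (List Int)) (changeTime : Int) (numLaps : Int) : Decidable (Pre_minimumFinishTime tires changeTime numLaps) := by unfold Pre_minimumFinishTime; infer_instance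

def pvWitness_minimumFinishTime : List (List Int) × Int × Int := ([[2, 3], [1, 10]], 6, 11)

def Spec_minimumFinishTime (tires : List (List Int)) (changeTime : Int) (numLaps : Int) (out : Int) : Prop := out = minimumFinishTime_alt tires changeTime numLaps
instance (tires : List (List Int)) (changeTime : Int) (numLaps : Int) (out : Int) : Decidable (Spec_minimumFinishTime tires changeTime numLaps out) := by unfold Spec_minimumFinishTime; infer_instance

-- ===== CLAIM (what is proved, stated in full; the proofs are below) =====
def Claim_equal_minimumFinishTime : Prop := ∀ (tires : List (List Int)) (changeTime : Int) (numLaps : Int), Dom_minimumFinishTime tires changeTime numLaps → Pre_minimumFinishTime tires changeTime numLaps → Spec_minimumFinishTime tires changeTime numLaps (minimumFinishTime tires changeTime numLaps)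

-- ===== LEMMAS AND PROOFS =====

-- proof-side helper: the value of A's dp(i) ignoring the cache
def dpPure (gs : List Int) (ct : Int) (i : Nat) : Int :=
  if i = 1 then gs.getD 1 0
  else
    (List.range' 1 (min 18 (i / 2))).attach.foldl
      (fun res j => min res (dpPure gs ct j.1 + ct + dpPure gs ct (i - j.1)))
      (if i ≤ 18 then gs.getD i 0 else (10:Int) ^ 10)
termination_by i
decreasing_by
  all_goals
    have := List.mem_range'_1.mp j.2
    omega

-- a cache state is sound if every stored value is the corresponding dp value
def MemoOK (gs : List Int) (ct : Int) (memo : Nat → Option Int) : Prop :=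
  ∀ k v, memo k = some v → v = dpPure gs ct k

theorem dpA_correct (gs : List Int) (ct : Int) :
    ∀ (i : Nat) (memo : Nat → Option Int), MemoOK gs ct memo →
      (dpA gs ct i memo).1 = dpPure gs ct i ∧ MemoOK gs ct (dpA gs ct i memo).2 := by
  intro i
  induction i using Nat.strong_induction_on with
  | _ i ih =>
    intro memo hOK
    rw [dpA]
    cases hmi : memo i with
    | some v =>
        exact ⟨hOK i v hmi, hOK⟩
    | none =>
        dsimp only
        by_cases h1 : i = 1
        · subst h1
          rw [if_pos rfl]
          constructor
          · show gs.getD 1 0 = dpPure gs ct 1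
            rw [dpPure, if_pos rfl]
          · intro k v hkv
            dsimp only at hkv
            by_cases hk : k = 1
            · subst hk
              rw [if_pos rfl] at hkv
              cases hkv
              rw [dpPure, if_pos rfl]
            · rw [if_neg hk] at hkv
              exact hOK k v hkv
        · rw [if_neg h1]
          have haux : ∀ (l : List {x // x ∈ List.range' 1 (min 18 (i / 2))})
              (acc : Int × (Nat → Option Int)), MemoOK gs ct acc.2 →
              (l.foldl
                (fun acc j =>
                  let p1 := dpA gs ct j.1 acc.2
                  let p2 := dpA gs ct (i - j.1) p1.2
                  (min acc.1 (p1.1 + ct + p2.1), p2.2)) acc).1 =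
                l.foldl (fun res j => min res (dpPure gs ct j.1 + ct + dpPure gs ct (i - j.1))) acc.1 ∧
              MemoOK gs ct
                (l.foldl
                  (fun acc j =>
                    let p1 := dpA gs ct j.1 acc.2
                    let p2 := dpA gs ct (i - j.1) p1.2
                    (min acc.1 (p1.1 + ct + p2.1), p2.2)) acc).2 := by
            intro l
            induction l with
            | nil => intro acc hacc; exact ⟨rfl, hacc⟩
            | cons j l ihl =>
                intro acc hacc
                have hj := List.mem_range'_1.mp j.2
                have hji : j.1 < i ∧ i - j.1 < i := by omega
                obtain ⟨e1, m1⟩ := ih j.1 hji.1 acc.2 hacc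
                obtain ⟨e2, m2⟩ := ih (i - j.1) hji.2 (dpA gs ct j.1 acc.2).2 m1
                simp only [List.foldl_cons]
                obtain ⟨efold, mfold⟩ := ihl
                  (min acc.1 ((dpA gs ct j.1 acc.2).1 + ct + (dpA gs ct (i - j.1) (dpA gs ct j.1 acc.2).2).1),
                   (dpA gs ct (i - j.1) (dpA gs ct j.1 acc.2).2).2) m2
                refine ⟨?_, mfold⟩
                rw [efold, e1, e2]
          obtain ⟨efold, mfold⟩ := haux (List.range' 1 (min 18 (i / 2))).attach
            (if i ≤ 18 then gs.getD i 0 else (10:Int) ^ 10, memo) hOK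
          have hval : (((List.range' 1 (min 18 (i / 2))).attach.foldl
                (fun acc j =>
                  let p1 := dpA gs ct j.1 acc.2
                  let p2 := dpA gs ct (i - j.1) p1.2
                  (min acc.1 (p1.1 + ct + p2.1), p2.2))
                (if i ≤ 18 then gs.getD i 0 else (10:Int) ^ 10, memo)).1 : Int) = dpPure gs ct i := by
            rw [efold, dpPure, if_neg h1]
          constructor
          · exact hval
          · intro k v hkv
            dsimp only at hkv
            by_cases hk : k = i
            · subst hk
              rw [if_pos rfl] at hkv
              cases hkv
              exact hval
            · rw [if_neg hk] at hkv
              exact mfold k v hkv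

-- innerLoop never touches index 0 (it starts at i = 1)
theorem innerLoop_getD_zero (gs : List Int) (total lap r : Int) (i : Nat) (hi : 1 ≤ i) :
    (innerLoop gs total lap r i).getD 0 0 = gs.getD 0 0 := by
  unfold innerLoop
  split
  · split
    · rw [List.getD_eq_getElem?_getD, List.getElem?_set_ne (by omega), ← List.getD_eq_getElem?_getD]
    · rw [innerLoop_getD_zero _ _ _ _ _ (by omega),
        List.getD_eq_getElem?_getD, List.getElem?_set_ne (by omega), ← List.getD_eq_getElem?_getD]
  · rfl
termination_by 19 - i
decreasing_by omega

theorem buildGS_getD_zero (tires : List (List Int)) :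
    (buildGS tires).getD 0 0 = (10:Int) ^ 10 := by
  unfold buildGS
  suffices h : ∀ (ts : List (List Int)) (gs : List Int), gs.getD 0 0 = (10:Int) ^ 10 →
      (ts.foldl (fun gs t => match t with | [f, r] => innerLoop gs f f r 1 | _ => gs) gs).getD 0 0 = (10:Int) ^ 10 by
    exact h tires _ (by rfl)
  intro ts
  induction ts with
  | nil => intro gs h; simpa using h
  | cons t ts ih =>
      intro gs h
      simp only [List.foldl_cons]
      apply ih
      match t with
      | [] => exact h
      | [f] => exact h
      | [f, r] => rw [innerLoop_getD_zero _ _ _ _ _ (by omega)]; exact h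
      | f :: r :: x :: rest => exact h

theorem tableB_succ (best : List Int) (ct : Int) (n : Nat) :
    tableB best ct (n + 1) = stepB best ct (tableB best ct n) (n + 1) := by
  unfold tableB
  rw [List.range'_concat, List.foldl_append, List.foldl_cons, List.foldl_nil, Nat.one_mul,
    Nat.add_comm 1 n]

theorem tableB_length (best : List Int) (ct : Int) (n : Nat) :
    (tableB best ct n).length = n + 1 := by
  induction n with
  | zero => rfl
  | succ n ih =>
      rw [tableB_succ]
      simp only [stepB, List.length_append, List.length_cons, List.length_nil]
      omega

theorem tableB_getD (best : List Int) (ct : Int)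
    (h0 : best.getD 0 0 = (10:Int) ^ 10) :
    ∀ (n i : Nat), i ≤ n → (tableB best ct n).getD i 0 = dpPure best ct i := by
  intro n
  induction n with
  | zero =>
      intro i hi
      interval_cases i
      rw [dpPure]
      simp only [tableB, List.range', List.foldl_nil,
        if_pos (by omega : (0:Nat) ≤ 18), if_neg (by omega : ¬(0:Nat) = 1)]
      rw [← h0]
      rfl
  | succ n ih =>
      intro i hi
      have hlen := tableB_length best ct n
      rcases Nat.lt_or_ge i (n + 1) with hlt | hge
      · -- old cell, untouched by the append
        have : (tableB best ct (n + 1)).getD i 0 = (tableB best ct n).getD i 0 := by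
          rw [tableB_succ]
          unfold stepB
          rw [List.getD_eq_getElem?_getD, List.getElem?_append_left (by omega), ← List.getD_eq_getElem?_getD]
        rw [this]
        exact ih i (by omega)
      · -- the freshly appended cell i = n + 1
        have hi' : i = n + 1 := by omega
        subst hi'
        have hfresh : (tableB best ct (n + 1)).getD (n + 1) 0 =
            (List.range' 1 (min 18 ((n + 1) / 2))).foldl
              (fun res j => min res ((tableB best ct n).getD j 0 + ct + (tableB best ct n).getD ((n + 1) - j) 0))
              (if n + 1 ≤ 18 then best.getD (n + 1) 0 else (10:Int) ^ 10) := by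
          rw [tableB_succ]
          unfold stepB
          rw [List.getD_eq_getElem?_getD, List.getElem?_append_right (by omega)]
          simp only [hlen]
          norm_num
        rw [hfresh]
        have hcongr : (List.range' 1 (min 18 ((n + 1) / 2))).foldl
              (fun res j => min res ((tableB best ct n).getD j 0 + ct + (tableB best ct n).getD ((n + 1) - j) 0))
              (if n + 1 ≤ 18 then best.getD (n + 1) 0 else (10:Int) ^ 10) =
            (List.range' 1 (min 18 ((n + 1) / 2))).foldl
              (fun res j => min res (dpPure best ct j + ct + dpPure best ct ((n + 1) - j)))
              (if n + 1 ≤ 18 then best.getD (n + 1) 0 else (10:Int) ^ 10) := by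
          apply PySem.List.foldl_congr_mem
          intro acc j hj
          have hj' := List.mem_range'_1.mp hj
          rw [ih j (by omega), ih ((n + 1) - j) (by omega)]
        rw [hcongr]
        rcases Nat.eq_zero_or_pos n with h1 | h1
        · -- n + 1 = 1 : dpPure takes the i = 1 branch; the fold range is empty
          subst h1
          rw [dpPure]
          norm_num
        · -- n + 1 ≥ 2 : dpPure takes the general branch
          rw [dpPure, if_neg (show ¬(n + 1 = 1) by omega)]
          exact (List.foldl_attach).symm

-- ===== VERDICT (by name: the statement is the Claim_ definition above) =====
theorem minimumFinishTime_spec : Claim_equal_minimumFinishTime := by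
  intro tires ct nl _ hpre
  unfold Spec_minimumFinishTime minimumFinishTime minimumFinishTime_alt
  rw [(dpA_correct (buildGS tires) ct nl.toNat (fun _ => none) (fun _ _ h => by cases h)).1]
  exact (tableB_getD (buildGS tires) ct (buildGS_getD_zero tires) nl.toNat nl.toNat le_rfl).symm
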